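-- pv_equiv track=rewrite | github.com/anlvdt/LaptopTesterPro | bak_autosave/bak_autosave/bak_autosave/bak_autosave/bak_autosave/bak_autosave/bak_20250828/laptoptester.py | parse_event_log
-- ===== SOURCE A (Python) =====
-- def parse_event_log(log_text):
--     events = []; current_event = {}
--     for line in log_text.splitlines():
--         line = line.strip()
--         if not line and current_event: events.append(current_event); current_event = {}; continue
--         parts = line.split(':', 1)
--         if len(parts) == 2: key, value = parts; current_event[key.strip()] = value.strip()
--     if current_event: events.append(current_event)
--     return events
-- ===== SOURCE B (Python) =====
-- from itertools import groupby
--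
-- def parse_event_log(log_text):
--     # Group lines into maximal runs of blank / non-blank, parse each non-blank run.
--     events = []
--     for is_content, run in groupby(log_text.splitlines(), key=lambda l: bool(l.strip())):
--         if not is_content:
--             continue
--         event = {}
--         for line in run:
--             parts = line.strip().split(':', 1)
--             if len(parts) == 2:
--                 event[parts[0].strip()] = parts[1].strip()
--         if event:
--             events.append(event)
--     return events
-- ===== Notes on version B (the rewrite author's own statement) =====
-- stated objective: alternative
-- what changed: Replaces the accumulating current_event dict flushed on blank lines by a groupby-based decomposition: split the lines into maximal blank/non-blank runs, parse each non-blank run into a dict, keep the non-empty dicts.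
import Mathlib
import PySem

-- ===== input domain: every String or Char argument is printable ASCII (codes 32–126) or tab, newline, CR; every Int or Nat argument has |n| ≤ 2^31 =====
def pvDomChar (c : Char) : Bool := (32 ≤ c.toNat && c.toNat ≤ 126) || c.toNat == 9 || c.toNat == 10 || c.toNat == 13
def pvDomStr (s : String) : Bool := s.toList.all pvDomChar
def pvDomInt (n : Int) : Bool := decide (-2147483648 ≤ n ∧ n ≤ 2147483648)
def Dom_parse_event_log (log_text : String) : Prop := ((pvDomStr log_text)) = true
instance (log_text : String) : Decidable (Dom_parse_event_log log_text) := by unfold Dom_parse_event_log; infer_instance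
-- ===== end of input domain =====

-- B re-implements A's blank-line-flushed accumulator as a groupby decomposition
-- (maximal blank/non-blank runs, each non-blank run parsed into one dict); same cost, alternative structure.

set_option maxHeartbeats 1000000

-- ===== PORT A =====
-- one iteration of A's loop: state = (events so far, current_event); line is stripped first
def pvStepA (st : List (List (String × String)) × PySem.Dict String String) (line0 : String) :
    List (List (String × String)) × PySem.Dict String String :=
  if PySem.Str.strip line0 = "" ∧ st.2.items ≠ [] then (st.1 ++ [st.2.items], PySem.Dict.empty)
  else
    match PySem.Str.splitMax? (PySem.Str.strip line0) ":" 1 with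
    | some [key, value] => (st.1, st.2.insert (PySem.Str.strip key) (PySem.Str.strip value))
    | _ => st

def parse_event_log (log_text : String) : List (List (String × String)) :=
  let fin := (PySem.Str.splitlines log_text).foldl pvStepA ([], PySem.Dict.empty)
  if fin.2.items ≠ [] then fin.1 ++ [fin.2.items] else fin.1

-- ===== PORT B =====
-- itertools.groupby: maximal runs of lines with equal key, in order
def pvGroupBy (key : String → Bool) : List String → List (Bool × List String)
  | [] => []
  | l :: ls =>
    (key l, l :: ls.takeWhile (fun x => key x == key l)) ::
      pvGroupBy key (ls.dropWhile (fun x => key x == key l))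
termination_by ls => ls.length
decreasing_by
  exact Nat.lt_succ_of_le (List.length_dropWhile_le _ _)

-- the inner loop of B: build one event dict from one run of lines
def pvParseRun (run : List String) : PySem.Dict String String :=
  run.foldl (fun event line0 =>
    match PySem.Str.splitMax? (PySem.Str.strip line0) ":" 1 with
    | some [key, value] => event.insert (PySem.Str.strip key) (PySem.Str.strip value)
    | _ => event) PySem.Dict.empty

def parse_event_log_alt (log_text : String) : List (List (String × String)) :=
  (pvGroupBy (fun l => PySem.Str.strip l ≠ "") (PySem.Str.splitlines log_text)).foldl
    (fun events g =>
      if g.1 then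
        if (pvParseRun g.2).items ≠ [] then events ++ [(pvParseRun g.2).items] else events
      else events) []

-- ===== PRECONDITION & SPEC =====
def Spec_parse_event_log (log_text : String) (out : List (List (String × String))) : Prop := out = parse_event_log_alt log_text
instance (log_text : String) (out : List (List (String × String))) : Decidable (Spec_parse_event_log log_text out) := by unfold Spec_parse_event_log; infer_instance

-- ===== CLAIM (what is proved, stated in full; the proofs are below) =====
def Claim_equal_parse_event_log : Prop := ∀ (log_text : String), Dom_parse_event_log log_text → Spec_parse_event_log log_text (parse_event_log log_text)

-- ===== LEMMAS AND PROOFS =====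

-- A's loop-state finisher
def pvFinA (st : List (List (String × String)) × PySem.Dict String String) :
    List (List (String × String)) :=
  if st.2.items ≠ [] then st.1 ++ [st.2.items] else st.1

-- B's per-group contribution
def pvG (g : Bool × List String) : List (List (String × String)) :=
  if g.1 then
    (if (pvParseRun g.2).items ≠ [] then [(pvParseRun g.2).items] else [])
  else []

theorem pvAlt_eq_flatMap (evs : List (List (String × String)))
    (gs : List (Bool × List String)) :
    gs.foldl (fun events g =>
      if g.1 then
        if (pvParseRun g.2).items ≠ [] then events ++ [(pvParseRun g.2).items] else events
      else events) evs = evs ++ gs.flatMap pvG := by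
  induction gs generalizing evs with
  | nil => simp
  | cons g gs ih =>
    simp only [List.foldl_cons, List.flatMap_cons, ih, pvG]
    split_ifs <;> simp only [List.append_assoc, List.nil_append]

theorem pvStepA_shift (evs : List (List (String × String)))
    (cur : PySem.Dict String String) (l : String) :
    pvStepA (evs, cur) l = (evs ++ (pvStepA ([], cur) l).1, (pvStepA ([], cur) l).2) := by
  simp only [pvStepA]
  by_cases h : PySem.Str.strip l = "" ∧ cur.items ≠ []
  · simp only [if_pos h]
    rfl
  · simp only [if_neg h]
    rcases PySem.Str.splitMax? (PySem.Str.strip l) ":" 1 with _ | (_ | ⟨k, _ | ⟨v, _ | _⟩⟩) <;>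
      simp

theorem pvFoldA_shift (lines : List String) (evs : List (List (String × String)))
    (cur : PySem.Dict String String) :
    pvFinA (lines.foldl pvStepA (evs, cur)) = evs ++ pvFinA (lines.foldl pvStepA ([], cur)) := by
  induction lines generalizing evs cur with
  | nil =>
    simp only [List.foldl_nil, pvFinA]
    split <;> simp
  | cons l ls ih =>
    rcases hX : pvStepA ([], cur) l with ⟨e1, c1⟩
    rw [List.foldl_cons, List.foldl_cons, pvStepA_shift evs cur l, hX]
    rw [ih (evs ++ e1) c1, ih e1 c1, List.append_assoc]

-- a blank line with an empty current_event is a no-op for A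
theorem pvStepA_blank_empty (l : String) (hl : PySem.Str.strip l = "")
    (evs : List (List (String × String))) :
    pvStepA (evs, PySem.Dict.empty) l = (evs, PySem.Dict.empty) := by
  simp only [pvStepA, hl]
  rfl

-- a run of blank lines with an empty current_event is a no-op for A
theorem pvFoldA_blank_run (run : List String) (hrun : ∀ x ∈ run, PySem.Str.strip x = "")
    (evs : List (List (String × String))) :
    run.foldl pvStepA (evs, PySem.Dict.empty) = (evs, PySem.Dict.empty) := by
  induction run generalizing evs with
  | nil => rfl
  | cons l ls ih =>
    rw [List.foldl_cons, pvStepA_blank_empty l (hrun l (by simp)),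
      ih (fun x hx => hrun x (by simp [hx]))]

-- a non-blank line never flushes: A's step is exactly B's inner-loop step
theorem pvStepA_content (l : String) (hl : PySem.Str.strip l ≠ "")
    (evs : List (List (String × String))) (cur : PySem.Dict String String) :
    pvStepA (evs, cur) l =
      (evs,
        match PySem.Str.splitMax? (PySem.Str.strip l) ":" 1 with
        | some [key, value] => cur.insert (PySem.Str.strip key) (PySem.Str.strip value)
        | _ => cur) := by
  simp only [pvStepA, if_neg (fun h : PySem.Str.strip l = "" ∧ cur.items ≠ [] => hl h.1)]
  rcases PySem.Str.splitMax? (PySem.Str.strip l) ":" 1 with _ | (_ | ⟨k, _ | ⟨v, _ | _⟩⟩) <;> rfl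

-- over a run of non-blank lines A just runs B's inner loop on current_event
theorem pvFoldA_content_run (run : List String) (hrun : ∀ x ∈ run, PySem.Str.strip x ≠ "")
    (evs : List (List (String × String))) (cur : PySem.Dict String String) :
    run.foldl pvStepA (evs, cur) =
      (evs, run.foldl (fun event line0 =>
        match PySem.Str.splitMax? (PySem.Str.strip line0) ":" 1 with
        | some [key, value] => event.insert (PySem.Str.strip key) (PySem.Str.strip value)
        | _ => event) cur) := by
  induction run generalizing cur with
  | nil => rfl
  | cons l ls ih =>
    rw [List.foldl_cons, pvStepA_content l (hrun l (by simp)) evs cur, List.foldl_cons,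
      ih (fun x hx => hrun x (by simp [hx]))]

theorem pvDropWhile_head_false {p : String → Bool} {l : List String} {x : String} {xs : List String}
    (h : l.dropWhile p = x :: xs) : p x = false := by
  have := List.dropWhile_get_zero_not p l (by rw [h]; simp)
  simpa [h] using Bool.eq_false_iff.mpr this

-- the main invariant: A's finished fold equals B's flatMap over the groups
theorem pvMain : ∀ (lines : List String),
    pvFinA (lines.foldl pvStepA ([], PySem.Dict.empty)) =
      (pvGroupBy (fun l => PySem.Str.strip l ≠ "") lines).flatMap pvG := by
  intro lines
  induction hn : lines.length using Nat.strong_induction_on generalizing lines with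
  | _ n ih =>
  match lines with
  | [] => simp [pvFinA, pvGroupBy, PySem.Dict.empty]
  | l :: ls =>
    subst hn
    set key : String → Bool := fun l => decide (PySem.Str.strip l ≠ "") with hkey
    have hdecomp : l :: ls =
        (l :: ls.takeWhile (fun x => key x == key l)) ++ ls.dropWhile (fun x => key x == key l) := by
      simp [List.takeWhile_append_dropWhile]
    by_cases hl : PySem.Str.strip l = ""
    · -- blank-run head: a no-op for A, an ignored group for B
      have hkl : key l = false := by simp [hkey, hl]
      have hGa : pvG (key l, l :: ls.takeWhile (fun x => key x == key l)) = [] := by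
        simp [pvG, hkl]
      rw [pvGroupBy, List.flatMap_cons, hGa, List.nil_append]
      rw [hdecomp, List.foldl_append,
        pvFoldA_blank_run (l :: ls.takeWhile (fun x => key x == key l))
          (by
            intro x hx
            rcases List.mem_cons.mp hx with h | h
            · simpa [h] using hl
            · have hm := List.mem_takeWhile_imp h
              rw [hkl, beq_iff_eq] at hm
              simpa [hkey] using hm) []]
      exact ih (ls.dropWhile (fun x => key x == key l)).length
        (Nat.lt_succ_of_le (List.length_dropWhile_le _ _))
        (ls.dropWhile (fun x => key x == key l)) rfl
    · -- content-run head
      have hkl : key l = true := by simp [hkey, hl]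
      have hcont : ∀ x ∈ l :: ls.takeWhile (fun x => key x == key l), PySem.Str.strip x ≠ "" := by
        intro x hx
        rcases List.mem_cons.mp hx with h | h
        · simpa [h] using hl
        · have hm := List.mem_takeWhile_imp h
          rw [hkl, beq_iff_eq] at hm
          simpa [hkey] using hm
      have hGb : pvG (key l, l :: ls.takeWhile (fun x => key x == key l)) =
          if (pvParseRun (l :: ls.takeWhile (fun x => key x == key l))).items ≠ []
          then [(pvParseRun (l :: ls.takeWhile (fun x => key x == key l))).items] else [] := by
        simp [pvG, hkl]
      rw [pvGroupBy, List.flatMap_cons, hGb]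
      rw [hdecomp, List.foldl_append, pvFoldA_content_run _ hcont]
      have hfold : (l :: ls.takeWhile (fun x => key x == key l)).foldl
          (fun event line0 =>
            match PySem.Str.splitMax? (PySem.Str.strip line0) ":" 1 with
            | some [key, value] => event.insert (PySem.Str.strip key) (PySem.Str.strip value)
            | _ => event) PySem.Dict.empty
          = pvParseRun (l :: ls.takeWhile (fun x => key x == key l)) := rfl
      rw [hfold]
      set d := pvParseRun (l :: ls.takeWhile (fun x => key x == key l)) with hd
      rcases hrest : ls.dropWhile (fun x => key x == key l) with _ | ⟨r, rest'⟩
      · -- no trailing blank: A flushes at the end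
        simp only [List.foldl_nil, pvFinA, pvGroupBy, List.flatMap_nil, List.append_nil]
        split <;> simp
      · -- trailing group starts with a blank line r
        have hr : PySem.Str.strip r = "" := by
          have h0 := pvDropWhile_head_false hrest
          rw [hkl] at h0
          by_contra hc
          simp [hkey, hc] at h0
        have hlen : (r :: rest').length < (l :: ls).length := by
          have h1 := List.length_dropWhile_le (fun x => key x == key l) ls
          rw [hrest] at h1
          simpa using Nat.lt_succ_of_le h1
        have ihrest := ih (r :: rest').length hlen (r :: rest') rfl
        rw [List.foldl_cons, pvStepA_blank_empty r hr []] at ihrest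
        by_cases hdnil : d.items = []
        · -- empty event: blank line is a no-op, nothing appended
          have hde : d = PySem.Dict.empty := by
            apply PySem.Dict.ext; simpa [PySem.Dict.empty] using hdnil
          have hif : (if d.items ≠ [] then [d.items] else []) = [] := by simp [hdnil]
          rw [hif, List.nil_append, List.foldl_cons, hde, pvStepA_blank_empty r hr []]
          exact ihrest
        · -- non-empty event: the blank line flushes it
          have hstep : pvStepA ([], d) r = ([d.items], PySem.Dict.empty) := by
            have hc : PySem.Str.strip r = "" ∧ d.items ≠ [] := ⟨hr, hdnil⟩
            simp only [pvStepA, if_pos hc, List.nil_append]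
          have hif : (if d.items ≠ [] then [d.items] else []) = [d.items] := by simp [hdnil]
          rw [hif, List.foldl_cons, hstep, pvFoldA_shift, ihrest]

-- ===== VERDICT (by name: the statement is the Claim_ definition above) =====
theorem parse_event_log_spec : Claim_equal_parse_event_log := by
  intro log_text _
  unfold Spec_parse_event_log parse_event_log parse_event_log_alt
  rw [pvAlt_eq_flatMap, List.nil_append]
  exact pvMain (PySem.Str.splitlines log_text)
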